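-- pv_equiv track=rewrite | github.com/Skadris/Sudoku | src/skdsudoku/engine/validator.py | no_duplicates
-- ===== SOURCE A (Python) =====
-- from typing import Iterable
--
-- def no_duplicates(nums: Iterable[int]) -> bool:
--     """
--     :param nums: sequence of numbers (row, column, or box).
--     :return: True if there are no duplicate non-zero values.
--     """
--     seen = set()
--     for n in nums:
--         if n == 0:
--             continue
--         if n in seen:
--             return False
--         seen.add(n)
--     return True
-- ===== SOURCE B (Python) =====
-- def no_duplicates(nums) -> bool:
--     vals = sorted(n for n in nums if n != 0)
--     return all(a != b for a, b in zip(vals, vals[1:]))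
-- ===== Notes on version B (the rewrite author's own statement) =====
-- stated objective: alternative
-- what changed: Replaces the incremental seen-set loop (hash membership, early exit) by sort-then-adjacent-scan: sort the non-zero values and check that no two neighbouring elements of the sorted list are equal.
import Mathlib
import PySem

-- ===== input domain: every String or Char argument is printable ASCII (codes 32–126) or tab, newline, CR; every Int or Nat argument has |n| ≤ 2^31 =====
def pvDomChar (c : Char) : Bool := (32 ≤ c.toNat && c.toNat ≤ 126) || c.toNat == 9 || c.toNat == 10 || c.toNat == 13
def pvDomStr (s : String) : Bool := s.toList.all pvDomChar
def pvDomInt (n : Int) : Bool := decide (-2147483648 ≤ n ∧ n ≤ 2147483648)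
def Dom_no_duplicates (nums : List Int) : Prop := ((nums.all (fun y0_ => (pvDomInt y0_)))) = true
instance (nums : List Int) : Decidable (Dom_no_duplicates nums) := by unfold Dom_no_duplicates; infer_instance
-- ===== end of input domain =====

-- B replaces A's incremental seen-set loop (membership probe with early exit) by a
-- different algorithm: sort the non-zero values, then scan once checking that no two
-- adjacent elements of the sorted list are equal (alternative algorithm, not faster).

-- ===== PORT A =====
-- the 'for n in nums' loop with early 'return False', carrying the 'seen' set
def noDupLoop (seen : PySem.Set Int) : List Int → Bool
  | [] => true
  | n :: rest =>
    if n = 0 then noDupLoop seen rest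
    else if PySem.Set.contains seen n then false
    else noDupLoop (PySem.Set.add seen n) rest

def no_duplicates (nums : List Int) : Bool :=
  noDupLoop PySem.Set.empty nums

-- ===== PORT B =====
-- vals = sorted(n for n in nums if n != 0); all(a != b for a, b in zip(vals, vals[1:]))
def no_duplicates_alt (nums : List Int) : Bool :=
  let vals := PySem.List.sorted (nums.filter (fun n => !(n == 0))) (fun x => x) false
  (vals.zip (PySem.List.slice vals (some 1) none)).all (fun p => !(p.1 == p.2))

-- ===== PRECONDITION & SPEC =====
def Spec_no_duplicates (nums : List Int) (out : Bool) : Prop := out = no_duplicates_alt nums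
instance (nums : List Int) (out : Bool) : Decidable (Spec_no_duplicates nums out) := by unfold Spec_no_duplicates; infer_instance

-- ===== CLAIM (what is proved, stated in full; the proofs are below) =====
def Claim_equal_no_duplicates : Prop := ∀ (nums : List Int), Dom_no_duplicates nums → Spec_no_duplicates nums (no_duplicates nums)

-- ===== LEMMAS AND PROOFS =====

-- A's loop returns true iff seen ++ (non-zero values) has no duplicate
theorem loopA_iff (nums : List Int) (seen : PySem.Set Int) (hs : seen.Nodup) :
    noDupLoop seen nums = true ↔ (seen ++ nums.filter (fun n => !(n == 0))).Nodup := by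
  induction nums generalizing seen with
  | nil => simp [noDupLoop, hs]
  | cons n rest ih =>
    by_cases h0 : n = 0
    · simpa [noDupLoop, h0] using ih seen hs
    · by_cases hm : n ∈ seen
      · have hc : PySem.Set.contains seen n = true := by simp [hm]
        rw [noDupLoop, if_neg h0, hc]
        simp only [if_true]
        constructor
        · intro h; cases h
        · intro h
          exfalso
          rcases List.nodup_append.mp h with ⟨-, -, hdisj⟩
          exact hdisj n hm n (by simp [h0]) rfl
      · have hc : PySem.Set.contains seen n = false := by simp [hm]
        have hadd : PySem.Set.add seen n = seen ++ [n] := by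
          simp [PySem.Set.add, hm]
        have hnd : (seen ++ [n]).Nodup := by
          simp only [List.nodup_append, hs, true_and]
          refine ⟨List.nodup_singleton n, ?_⟩
          intro a ha b hb
          simp only [List.mem_singleton] at hb
          subst hb; exact fun h => hm (h ▸ ha)
        rw [noDupLoop, if_neg h0, hc]
        simp only [Bool.false_eq_true, if_false, hadd]
        rw [ih (seen ++ [n]) hnd]
        simp [h0, List.append_assoc]

-- on a ≤-sorted list, "no two adjacent elements equal" is exactly Nodup
theorem adj_all_iff_nodup : ∀ (vals : List Int), vals.Pairwise (· ≤ ·) →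
    (((vals.zip vals.tail).all (fun p => !(p.1 == p.2)) = true) ↔ vals.Nodup)
  | [], _ => by simp
  | [x], _ => by simp
  | x :: y :: rest, h => by
    have h1 := List.pairwise_cons.mp h
    have ih := adj_all_iff_nodup (y :: rest) h1.2
    have hy := List.pairwise_cons.mp h1.2
    simp only [List.tail_cons, List.zip_cons_cons, List.all_cons, Bool.and_eq_true,
      Bool.not_eq_true', beq_eq_false_iff_ne, ne_eq] at ih ⊢
    constructor
    · rintro ⟨hxy, hrest⟩
      refine List.nodup_cons.mpr ⟨?_, ih.mp hrest⟩
      intro hmem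
      rcases List.mem_cons.mp hmem with rfl | hr
      · exact hxy rfl
      · have hxle : x ≤ y := h1.1 y (by simp)
        have hylex : y ≤ x := hy.1 x hr
        exact hxy (by omega)
    · intro hnd
      rcases List.nodup_cons.mp hnd with ⟨hnm, hnd'⟩
      exact ⟨fun he => hnm (by simp [he]), ih.mpr hnd'⟩

-- ===== VERDICT (by name: the statement is the Claim_ definition above) =====
theorem no_duplicates_spec : Claim_equal_no_duplicates := by
  intro nums _
  unfold Spec_no_duplicates no_duplicates no_duplicates_alt
  rw [Bool.eq_iff_iff]
  simp only [PySem.List.slice_from_one]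
  set vals := PySem.List.sorted (nums.filter (fun n => !(n == 0))) (fun x => x) false with hv
  have hpw : vals.Pairwise (· ≤ ·) := PySem.List.sorted_pairwise _ _
  rw [adj_all_iff_nodup vals hpw]
  have hperm : vals.Perm (nums.filter (fun n => !(n == 0))) := PySem.List.sorted_perm _ _ _
  rw [hperm.nodup_iff]
  have := loopA_iff nums PySem.Set.empty (by simp [PySem.Set.empty])
  simpa [PySem.Set.empty] using this
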